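-- pv_equiv track=rewrite | github.com/alpbel0/dataneuron | tools/analysis_tools.py | _extract_key_data
-- ===== SOURCE A (Python) =====
-- from typing import Dict, Any, List, Optional
--
-- def _extract_key_data(result: Dict[str, Any]) -> Dict[str, Any]:
--     """
--     Extract key data points from a tool result.
--
--     Args:
--         result: Tool result dictionary
--
--     Returns:
--         Dictionary with key data points
--     """
--     key_data = {}
--
--     # Common fields to extract
--     key_fields = [
--         'key_findings', 'findings', 'recommendations', 'insights',
--         'similarities', 'differences', 'risks_identified',
--         'overall_risk_level', 'documents_compared'
--     ]
--
--     for field in key_fields: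
--         if field in result:
--             key_data[field] = result[field]
--
--     return key_data
-- ===== SOURCE B (Python) =====
-- _ORDER = {f: i for i, f in enumerate([
--     'key_findings', 'findings', 'recommendations', 'insights',
--     'similarities', 'differences', 'risks_identified',
--     'overall_risk_level', 'documents_compared'
-- ])}
--
--
-- def _extract_key_data(result):
--     """Extract key data points from a tool result (filter + rank-sort)."""
--     items = [kv for kv in result.items() if kv[0] in _ORDER]
--     items.sort(key=lambda kv: _ORDER[kv[0]])
--     return dict(items)
-- ===== Notes on version B (the rewrite author's own statement) =====
-- stated objective: alternative
-- what changed: Instead of scanning the fixed 9-field list and probing the dict per field, B filters the dict's own items through a field-to-rank table and stably sorts the kept items by rank, reproducing A's output order.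
import Mathlib
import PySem

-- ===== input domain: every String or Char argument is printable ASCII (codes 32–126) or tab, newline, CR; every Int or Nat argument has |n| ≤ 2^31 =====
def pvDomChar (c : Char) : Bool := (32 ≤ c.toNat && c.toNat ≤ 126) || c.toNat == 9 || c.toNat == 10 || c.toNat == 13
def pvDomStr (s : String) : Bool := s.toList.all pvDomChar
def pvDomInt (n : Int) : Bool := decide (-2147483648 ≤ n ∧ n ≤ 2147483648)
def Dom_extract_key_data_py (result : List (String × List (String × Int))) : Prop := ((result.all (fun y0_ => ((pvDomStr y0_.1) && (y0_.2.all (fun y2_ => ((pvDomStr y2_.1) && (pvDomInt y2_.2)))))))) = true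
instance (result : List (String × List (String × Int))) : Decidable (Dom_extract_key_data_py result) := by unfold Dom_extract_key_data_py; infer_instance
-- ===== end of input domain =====

-- B replaces A's scan of the fixed field list (with dict lookups) by a single filter of the
-- input dict's items through a field→rank table followed by a stable sort on that rank
-- (objective: alternative structure; same output dict including insertion order).

-- ===== PORT A =====
def keyFieldsA : List String :=
  ["key_findings", "findings", "recommendations", "insights",
   "similarities", "differences", "risks_identified",
   "overall_risk_level", "documents_compared"]

-- literal port of A: for field in key_fields: if field in result: key_data[field] = result[field]
def extract_key_data_py (result : List (String × List (String × Int))) : List (String × List (String × Int)) :=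
  (keyFieldsA.foldl
    (fun (keyData : PySem.Dict String (List (String × Int))) field =>
      match (PySem.Dict.mk result).get? field with
      | some v => keyData.insert field v
      | none => keyData)
    PySem.Dict.empty).items

-- ===== PORT B =====
-- _ORDER = {f: i for i, f in enumerate([...])}
def orderDictB : PySem.Dict String Int :=
  PySem.Dict.ofList
    [("key_findings", 0), ("findings", 1), ("recommendations", 2), ("insights", 3),
     ("similarities", 4), ("differences", 5), ("risks_identified", 6),
     ("overall_risk_level", 7), ("documents_compared", 8)]

def extract_key_data_py_alt (result : List (String × List (String × Int))) : List (String × List (String × Int)) :=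
  (PySem.Dict.ofList
    (PySem.List.sorted
      (result.filter (fun kv => orderDictB.contains kv.1))
      (fun kv => orderDictB.getD kv.1 0))).items

-- ===== PRECONDITION & SPEC =====
-- Pre_ requires pairwise-distinct keys: the Python argument is a dict, whose items can never
-- repeat a key, so this excludes no Python-reachable input (only ill-formed association lists).
def Pre_extract_key_data_py (result : List (String × List (String × Int))) : Prop :=
  (result.map Prod.fst).Nodup
instance (result : List (String × List (String × Int))) : Decidable (Pre_extract_key_data_py result) := by
  unfold Pre_extract_key_data_py; infer_instance

def pvWitness_extract_key_data_py : (List (String × List (String × Int))) :=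
  [("findings", [("a", 1)]), ("other", []), ("key_findings", [("b", 2)])]

def Spec_extract_key_data_py (result : List (String × List (String × Int))) (out : List (String × List (String × Int))) : Prop := out = extract_key_data_py_alt result
instance (result : List (String × List (String × Int))) (out : List (String × List (String × Int))) : Decidable (Spec_extract_key_data_py result out) := by unfold Spec_extract_key_data_py; infer_instance

-- ===== CLAIM (what is proved, stated in full; the proofs are below) =====
def Claim_equal_extract_key_data_py : Prop := ∀ (result : List (String × List (String × Int))), Dom_extract_key_data_py result → Pre_extract_key_data_py result → Spec_extract_key_data_py result (extract_key_data_py result)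

-- ===== LEMMAS AND PROOFS =====

-- A's loop, as a filterMap over the field list.
def gA (result : List (String × List (String × Int))) (f : String) :
    Option (String × List (String × Int)) :=
  ((PySem.Dict.mk result).get? f).map (fun v => (f, v))

lemma foldlA_items (result : List (String × List (String × Int))) :
    ∀ (fs : List String) (d : PySem.Dict String (List (String × Int))),
      fs.Nodup → (∀ f ∈ fs, d.contains f = false) →
      (fs.foldl
        (fun keyData field =>
          match (PySem.Dict.mk result).get? field with
          | some v => keyData.insert field v
          | none => keyData) d).items = d.items ++ fs.filterMap (gA result) := by
  intro fs
  induction fs with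
  | nil => intro d _ _; simp
  | cons f t ih =>
    intro d hnd hfresh
    simp only [List.foldl_cons, List.filterMap_cons]
    rcases hg : (PySem.Dict.mk result).get? f with _ | v
    · simp only [gA, hg, Option.map_none]
      rw [ih d (List.nodup_cons.mp hnd).2 (fun x hx => hfresh x (List.mem_cons_of_mem _ hx))]
      simp [gA]
    · simp only [gA, hg, Option.map_some]
      rw [ih (d.insert f v) (List.nodup_cons.mp hnd).2]
      · rw [PySem.Dict.items_insert_of_not_contains _ _ (hfresh f (List.mem_cons_self))]
        simp [gA]
      · intro x hx
        have hxf : x ≠ f := fun h => (List.nodup_cons.mp hnd).1 (h ▸ hx)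
        rw [PySem.Dict.contains_eq_decide_mem_keys, PySem.Dict.keys_insert_of_not_contains _ _ (hfresh f (List.mem_cons_self))]
        simp only [decide_eq_false_iff_not, List.mem_append, List.mem_singleton]
        rintro (h | h)
        · have := hfresh x (List.mem_cons_of_mem _ hx)
          rw [PySem.Dict.contains_eq_decide_mem_keys] at this
          simp only [decide_eq_false_iff_not] at this
          exact this h
        · exact hxf h

lemma extractA_eq (result : List (String × List (String × Int))) :
    extract_key_data_py result = keyFieldsA.filterMap (gA result) := by
  unfold extract_key_data_py
  rw [foldlA_items result keyFieldsA PySem.Dict.empty (by decide)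
    (fun f _ => by rfl)]
  rfl

-- inserting one fresh binding at the front of the dict permutes the extracted list by a cons
lemma filterMap_update_perm (v : List (String × Int)) (k : String)
    (g0 : String → Option (String × List (String × Int))) (hk : g0 k = none) :
    ∀ (fs : List String), fs.Nodup → k ∈ fs →
      (fs.filterMap (fun f => if (k == f) = true then some (f, v) else g0 f)).Perm
        ((k, v) :: fs.filterMap g0) := by
  intro fs
  induction fs with
  | nil => intro _ h; simp at h
  | cons f t ih =>
    intro hnd hmem
    by_cases hfk : f = k
    · subst hfk
      have hknt : f ∉ t := (List.nodup_cons.mp hnd).1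
      have ht : t.filterMap (fun f' => if (f == f') = true then some (f', v) else g0 f') = t.filterMap g0 := by
        apply List.filterMap_congr
        intro x hx
        have : (f == x) = false := by
          simp only [beq_eq_false_iff_ne, ne_eq]
          intro h; exact hknt (h ▸ hx)
        simp [this]
      simp only [List.filterMap_cons, beq_self_eq_true, if_pos, hk, ht]
      exact List.Perm.refl _
    · have hkt : k ∈ t := by
        rcases List.mem_cons.mp hmem with h | h
        · exact absurd h.symm hfk
        · exact h
      have hbeq : (k == f) = false := by simp [Ne.symm hfk]
      simp only [List.filterMap_cons, hbeq]
      rcases hg : g0 f with _ | x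
      · simpa [hg] using ih (List.nodup_cons.mp hnd).2 hkt
      · show (x :: List.filterMap (fun f => if (k == f) = true then some (f, v) else g0 f) t).Perm
            ((k, v) :: x :: List.filterMap g0 t)
        exact List.Perm.trans ((ih (List.nodup_cons.mp hnd).2 hkt).cons x) (List.Perm.swap _ _ _)

lemma filterMap_perm_filter (fs : List String) (hfs : fs.Nodup) :
    ∀ (result : List (String × List (String × Int))), (result.map Prod.fst).Nodup →
      (fs.filterMap (gA result)).Perm
        (result.filter (fun kv => decide (kv.1 ∈ fs))) := by
  intro result
  induction result with
  | nil =>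
    intro _
    have : ∀ f ∈ fs, gA ([] : List (String × List (String × Int))) f = none := by
      intro f _; rfl
    simp [List.filterMap_eq_nil_iff.mpr this]
  | cons kv rest ih =>
    intro hnd
    obtain ⟨k, v⟩ := kv
    have hknr : k ∉ rest.map Prod.fst := (List.nodup_cons.mp hnd).1
    have hgsplit : ∀ f, gA ((k, v) :: rest) f =
        if (k == f) = true then some (f, v) else gA rest f := by
      intro f
      simp only [gA, PySem.Dict.get?_mk_cons]
      by_cases h : k = f <;> simp [h]
    by_cases hmem : k ∈ fs
    · have hgk : gA rest k = none := by
        simp only [gA, Option.map_eq_none_iff]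
        rw [PySem.Dict.get?_eq_none_iff_not_mem_keys]
        simpa [PySem.Dict.keys] using hknr
      have h1 : (fs.filterMap (gA ((k, v) :: rest))).Perm ((k, v) :: fs.filterMap (gA rest)) := by
        have hperm := filterMap_update_perm v k (gA rest) hgk fs hfs hmem
        have heq : fs.filterMap (gA ((k, v) :: rest))
            = fs.filterMap (fun f => if (k == f) = true then some (f, v) else gA rest f) :=
          List.filterMap_congr (fun f _ => hgsplit f)
        rw [heq]
        exact hperm
      have h2 := (ih (List.nodup_cons.mp hnd).2).cons (k, v)
      simp only [List.filter_cons, hmem, decide_true, if_pos]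
      exact h1.trans h2
    · have heq : fs.filterMap (gA ((k, v) :: rest)) = fs.filterMap (gA rest) := by
        apply List.filterMap_congr
        intro f hf
        rw [hgsplit f]
        have : (k == f) = false := by
          simp only [beq_eq_false_iff_ne, ne_eq]
          intro h; exact hmem (h ▸ hf)
        simp [this]
      simp only [List.filter_cons, hmem, decide_false, if_neg, Bool.false_eq_true,
        not_false_eq_true]
      rw [heq]
      exact ih (List.nodup_cons.mp hnd).2

lemma gA_key (result : List (String × List (String × Int))) (f : String) (x : String × List (String × Int))
    (h : gA result f = some x) : x.1 = f := by
  simp only [gA, Option.map_eq_some_iff] at h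
  obtain ⟨v, _, rfl⟩ := h
  rfl

lemma extractA_pairwise (result : List (String × List (String × Int))) :
    (keyFieldsA.filterMap (gA result)).Pairwise
      (fun a b => orderDictB.getD a.1 0 < orderDictB.getD b.1 0) := by
  rw [List.pairwise_filterMap]
  have hbase : keyFieldsA.Pairwise (fun a b => orderDictB.getD a 0 < orderDictB.getD b 0) := by decide
  refine hbase.imp_of_mem ?_
  intro a b _ _ hab x hx y hy
  rw [gA_key result a x hx, gA_key result b y hy]
  exact hab

lemma contains_orderDictB (s : String) :
    orderDictB.contains s = decide (s ∈ keyFieldsA) := by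
  rw [PySem.Dict.contains_eq_decide_mem_keys]
  rfl

lemma nodup_keys_extractA (result : List (String × List (String × Int))) :
    ((keyFieldsA.filterMap (gA result)).map Prod.fst).Nodup := by
  have : ∀ fs : List String, fs.Nodup → ((fs.filterMap (gA result)).map Prod.fst).Nodup := by
    intro fs
    induction fs with
    | nil => intro _; simp
    | cons f t ih =>
      intro hnd
      rcases hg : gA result f with _ | x
      · simpa [List.filterMap_cons, hg] using ih (List.nodup_cons.mp hnd).2
      · simp only [List.filterMap_cons, hg, List.map_cons, List.nodup_cons]
        refine ⟨?_, ih (List.nodup_cons.mp hnd).2⟩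
        rw [gA_key result f x hg]
        simp only [List.mem_map, not_exists, not_and]
        rintro y hy
        obtain ⟨f', hf', hgy⟩ := List.mem_filterMap.mp hy
        rw [gA_key result f' y hgy]
        intro h
        exact (List.nodup_cons.mp hnd).1 (h ▸ hf')
  exact this keyFieldsA (by decide)

lemma items_ofList_of_nodup (l : List (String × List (String × Int)))
    (h : (l.map Prod.fst).Nodup) : (PySem.Dict.ofList l).items = l := by
  have hdef : PySem.Dict.ofList l = l.foldl (fun d a => d.insert a.1 a.2) PySem.Dict.empty := rfl
  rw [hdef]
  have := PySem.Dict.items_foldl_insert_fresh l Prod.fst Prod.snd PySem.Dict.empty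
    (fun a _ => by rfl) h
  simpa using this

-- ===== VERDICT (by name: the statement is the Claim_ definition above) =====
theorem extract_key_data_py_spec : Claim_equal_extract_key_data_py := by
  intro result _ hpre
  unfold Spec_extract_key_data_py extract_key_data_py_alt
  rw [extractA_eq]
  have hfilter : result.filter (fun kv => orderDictB.contains kv.1)
      = result.filter (fun kv => decide (kv.1 ∈ keyFieldsA)) := by
    apply List.filter_congr
    intro kv _
    exact contains_orderDictB kv.1
  rw [hfilter,
    PySem.List.sorted_eq_of_perm_of_pairwise_lt _ _ _
      (filterMap_perm_filter keyFieldsA (by decide) result hpre)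
      (extractA_pairwise result),
    items_ofList_of_nodup _ (nodup_keys_extractA result)]
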